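-- pv_equiv track=rewrite | github.com/Wulfic/Cicada3301 | Tools/try_p20_prime_key_candidate.py | to_runes
-- ===== SOURCE A (Python) =====
-- LATIN_TABLE = [
--     "F", "U", "TH", "O", "R", "C", "G", "W", "H", "N", "I", "J", "EO", "P", "X",
--     "S", "T", "B", "E", "M", "L", "NG", "OE", "D", "A", "AE", "Y", "IA", "EA"
-- ]
--
-- def to_runes(text):
--     text = text.upper()
--     res = []
--     i = 0
--     while i < len(text):
--         found = False
--         if i+1 < len(text):
--             pair = text[i:i+2]
--             if pair in LATIN_TABLE:
--                 res.append(LATIN_TABLE.index(pair))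
--                 i += 2
--                 found = True
--         if not found and i < len(text):
--             char = text[i]
--             if char in LATIN_TABLE:
--                 res.append(LATIN_TABLE.index(char))
--             i += 1
--     return res
-- ===== SOURCE B (Python) =====
-- LATIN_TABLE = [
--     "F", "U", "TH", "O", "R", "C", "G", "W", "H", "N", "I", "J", "EO", "P", "X",
--     "S", "T", "B", "E", "M", "L", "NG", "OE", "D", "A", "AE", "Y", "IA", "EA"
-- ]
-- DIGRAPHS = {t: i for i, t in enumerate(LATIN_TABLE) if len(t) == 2}
-- SINGLES = {t: i for i, t in enumerate(LATIN_TABLE) if len(t) == 1}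
--
-- def to_runes(text):
--     # one-pass state machine: carry at most one pending character;
--     # a new character either completes a digraph with it or flushes it as a single
--     out = []
--     pending = None
--     for ch in text.upper():
--         if pending is not None:
--             d = DIGRAPHS.get(pending + ch)
--             if d is not None:
--                 out.append(d)
--                 pending = None
--                 continue
--             s = SINGLES.get(pending)
--             if s is not None:
--                 out.append(s)
--         pending = ch
--     if pending is not None:
--         s = SINGLES.get(pending)
--         if s is not None:
--             out.append(s)
--     return out
-- ===== Notes on version B (the rewrite author's own statement) =====
-- stated objective: faster
-- what changed: Replaces the index-based while loop with lookahead slicing and linear `in`/`.index` table scans by a single forward-pass state machine that carries at most one pending character and resolves it against precomputed digraph/single dictionaries.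
import Mathlib
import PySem

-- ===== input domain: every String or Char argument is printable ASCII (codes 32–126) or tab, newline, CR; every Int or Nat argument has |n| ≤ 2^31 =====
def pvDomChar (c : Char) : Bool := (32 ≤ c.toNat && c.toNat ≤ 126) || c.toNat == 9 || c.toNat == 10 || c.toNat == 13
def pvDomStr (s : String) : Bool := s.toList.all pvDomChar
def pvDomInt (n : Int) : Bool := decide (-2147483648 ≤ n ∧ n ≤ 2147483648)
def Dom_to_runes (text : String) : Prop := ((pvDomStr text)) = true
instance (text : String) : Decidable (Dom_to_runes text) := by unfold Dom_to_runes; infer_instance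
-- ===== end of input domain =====

-- B replaces A's index-based while loop (lookahead slice + linear `in`/`.index` table scans)
-- by a one-pass state machine with a pending character and precomputed digraph/single dicts
-- (objective: alternative; same return value on every input).

-- ===== PORT A =====
-- strings are handled as List Char (PySem.Chars view); the table keeps Python's order
def LATIN_TABLE : List (List Char) :=
  [['F'], ['U'], ['T', 'H'], ['O'], ['R'], ['C'], ['G'], ['W'], ['H'], ['N'],
   ['I'], ['J'], ['E', 'O'], ['P'], ['X'], ['S'], ['T'], ['B'], ['E'], ['M'],
   ['L'], ['N', 'G'], ['O', 'E'], ['D'], ['A'], ['A', 'E'], ['Y'], ['I', 'A'], ['E', 'A']]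

-- the while loop of A, step for step; `.index` is guarded by `in`, so getD 0 is never the default
def to_runes_loop (cs : List Char) (i : Nat) (res : List Int) : List Int :=
  if _h : i < cs.length then
    if i + 1 < cs.length then
      let pair := (cs.drop i).take 2
      if pair ∈ LATIN_TABLE then
        to_runes_loop cs (i + 2) (res ++ [(((PySem.List.index? LATIN_TABLE pair).getD 0 : Nat) : Int)])
      else
        let c := (cs.drop i).take 1
        if c ∈ LATIN_TABLE then
          to_runes_loop cs (i + 1) (res ++ [(((PySem.List.index? LATIN_TABLE c).getD 0 : Nat) : Int)])
        else
          to_runes_loop cs (i + 1) res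
    else
      let c := (cs.drop i).take 1
      if c ∈ LATIN_TABLE then
        to_runes_loop cs (i + 1) (res ++ [(((PySem.List.index? LATIN_TABLE c).getD 0 : Nat) : Int)])
      else
        to_runes_loop cs (i + 1) res
  else res
termination_by cs.length - i
decreasing_by all_goals omega

def to_runes (text : String) : List Int :=
  to_runes_loop (PySem.Str.upper text).toList 0 []

-- ===== PORT B =====
-- the dict comprehensions of Source B: {t: i for i, t in enumerate(LATIN_TABLE) if len(t) == k}
def DIGRAPHS : PySem.Dict (List Char) Int :=
  PySem.Dict.ofList
    (((PySem.List.enumerate LATIN_TABLE).filter (fun p => p.2.length == 2)).map (fun p => (p.2, p.1)))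

def SINGLES : PySem.Dict (List Char) Int :=
  PySem.Dict.ofList
    (((PySem.List.enumerate LATIN_TABLE).filter (fun p => p.2.length == 1)).map (fun p => (p.2, p.1)))

-- one iteration of Source B's for loop: state = (pending, out)
def to_runes_step (st : Option Char × List Int) (ch : Char) : Option Char × List Int :=
  match st with
  | (some p, out) =>
    match PySem.Dict.get? DIGRAPHS [p, ch] with
    | some d => (none, out ++ [d])
    | none =>
      match PySem.Dict.get? SINGLES [p] with
      | some s => (some ch, out ++ [s])
      | none => (some ch, out)
  | (none, out) => (some ch, out)

-- the final `if pending is not None` flush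
def to_runes_flush (st : Option Char × List Int) : List Int :=
  match st.1 with
  | some p =>
    match PySem.Dict.get? SINGLES [p] with
    | some s => st.2 ++ [s]
    | none => st.2
  | none => st.2

def to_runes_alt (text : String) : List Int :=
  to_runes_flush ((PySem.Str.upper text).toList.foldl to_runes_step (none, []))

-- ===== PRECONDITION & SPEC =====
def Spec_to_runes (text : String) (out : List Int) : Prop := out = to_runes_alt text
instance (text : String) (out : List Int) : Decidable (Spec_to_runes text out) := by unfold Spec_to_runes; infer_instance

-- ===== CLAIM (what is proved, stated in full; the proofs are below) =====
def Claim_equal_to_runes : Prop := ∀ (text : String), Dom_to_runes text → Spec_to_runes text (to_runes text)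

-- ===== LEMMAS AND PROOFS =====

-- greedy tokenisation both programs compute, phrased on the character list
def tok : List Char → List Int
  | [] => []
  | [a] =>
    match PySem.Dict.get? SINGLES [a] with
    | some s => [s]
    | none => []
  | a :: b :: rest =>
    match PySem.Dict.get? DIGRAPHS [a, b] with
    | some d => d :: tok rest
    | none =>
      (match PySem.Dict.get? SINGLES [a] with
       | some s => [s]
       | none => []) ++ tok (b :: rest)

lemma pair_bridge (a b : Char) :
    (if [a, b] ∈ LATIN_TABLE then
        some (((PySem.List.index? LATIN_TABLE [a, b]).getD 0 : Nat) : Int)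
      else none) = PySem.Dict.get? DIGRAPHS [a, b] := by
  by_cases h0 : a = 'T' ∧ b = 'H'
  · obtain ⟨rfl, rfl⟩ := h0; decide
  by_cases h1 : a = 'E' ∧ b = 'O'
  · obtain ⟨rfl, rfl⟩ := h1; decide
  by_cases h2 : a = 'N' ∧ b = 'G'
  · obtain ⟨rfl, rfl⟩ := h2; decide
  by_cases h3 : a = 'O' ∧ b = 'E'
  · obtain ⟨rfl, rfl⟩ := h3; decide
  by_cases h4 : a = 'A' ∧ b = 'E'
  · obtain ⟨rfl, rfl⟩ := h4; decide
  by_cases h5 : a = 'I' ∧ b = 'A'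
  · obtain ⟨rfl, rfl⟩ := h5; decide
  by_cases h6 : a = 'E' ∧ b = 'A'
  · obtain ⟨rfl, rfl⟩ := h6; decide
  · have hm : [a, b] ∉ LATIN_TABLE := by
      intro hmem
      simp [LATIN_TABLE] at hmem
      rcases hmem with h|h|h|h|h|h|h
      exacts [h0 h, h1 h, h2 h, h3 h, h4 h, h5 h, h6 h]
    rw [if_neg hm, eq_comm, PySem.Dict.get?_eq_none_iff_not_mem_keys]
    have hk : (PySem.Dict.keys DIGRAPHS) =
        [['T', 'H'], ['E', 'O'], ['N', 'G'], ['O', 'E'], ['A', 'E'], ['I', 'A'], ['E', 'A']] := by decide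
    rw [hk]
    simp only [List.mem_cons, List.mem_singleton, List.cons.injEq, and_true,
      List.not_mem_nil, or_false]
    intro hmem
    rcases hmem with h|h|h|h|h|h|h
    exacts [h0 h, h1 h, h2 h, h3 h, h4 h, h5 h, h6 h]

lemma single_bridge (a : Char) :
    (if [a] ∈ LATIN_TABLE then
        some (((PySem.List.index? LATIN_TABLE [a]).getD 0 : Nat) : Int)
      else none) = PySem.Dict.get? SINGLES [a] := by
  by_cases h0 : a = 'F'
  · subst h0; decide
  by_cases h1 : a = 'U'
  · subst h1; decide
  by_cases h2 : a = 'O'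
  · subst h2; decide
  by_cases h3 : a = 'R'
  · subst h3; decide
  by_cases h4 : a = 'C'
  · subst h4; decide
  by_cases h5 : a = 'G'
  · subst h5; decide
  by_cases h6 : a = 'W'
  · subst h6; decide
  by_cases h7 : a = 'H'
  · subst h7; decide
  by_cases h8 : a = 'N'
  · subst h8; decide
  by_cases h9 : a = 'I'
  · subst h9; decide
  by_cases h10 : a = 'J'
  · subst h10; decide
  by_cases h11 : a = 'P'
  · subst h11; decide
  by_cases h12 : a = 'X'
  · subst h12; decide
  by_cases h13 : a = 'S'
  · subst h13; decide
  by_cases h14 : a = 'T'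
  · subst h14; decide
  by_cases h15 : a = 'B'
  · subst h15; decide
  by_cases h16 : a = 'E'
  · subst h16; decide
  by_cases h17 : a = 'M'
  · subst h17; decide
  by_cases h18 : a = 'L'
  · subst h18; decide
  by_cases h19 : a = 'D'
  · subst h19; decide
  by_cases h20 : a = 'A'
  · subst h20; decide
  by_cases h21 : a = 'Y'
  · subst h21; decide
  · have hm : [a] ∉ LATIN_TABLE := by
      intro hmem
      simp [LATIN_TABLE] at hmem
      rcases hmem with h|h|h|h|h|h|h|h|h|h|h|h|h|h|h|h|h|h|h|h|h|h
      exacts [h0 h, h1 h, h2 h, h3 h, h4 h, h5 h, h6 h, h7 h, h8 h, h9 h, h10 h, h11 h, h12 h, h13 h, h14 h, h15 h, h16 h, h17 h, h18 h, h19 h, h20 h, h21 h]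
    rw [if_neg hm, eq_comm, PySem.Dict.get?_eq_none_iff_not_mem_keys]
    have hk : (PySem.Dict.keys SINGLES) =
        [['F'], ['U'], ['O'], ['R'], ['C'], ['G'], ['W'], ['H'], ['N'], ['I'], ['J'], ['P'], ['X'], ['S'], ['T'], ['B'], ['E'], ['M'], ['L'], ['D'], ['A'], ['Y']] := by decide
    rw [hk]
    simp only [List.mem_cons, List.mem_singleton, List.cons.injEq, and_true,
      List.not_mem_nil, or_false]
    intro hmem
    rcases hmem with h|h|h|h|h|h|h|h|h|h|h|h|h|h|h|h|h|h|h|h|h|h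
    exacts [h0 h, h1 h, h2 h, h3 h, h4 h, h5 h, h6 h, h7 h, h8 h, h9 h, h10 h, h11 h, h12 h, h13 h, h14 h, h15 h, h16 h, h17 h, h18 h, h19 h, h20 h, h21 h]

lemma loopA_eq (n : Nat) : ∀ (cs : List Char) (i : Nat) (res : List Int),
    cs.length - i ≤ n → to_runes_loop cs i res = res ++ tok (cs.drop i) := by
  induction n with
  | zero =>
    intro cs i res h
    have hle : cs.length ≤ i := by omega
    rw [to_runes_loop, dif_neg (by omega), List.drop_eq_nil_of_le hle]
    simp [tok]
  | succ n ih =>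
    intro cs i res h
    by_cases hi : i < cs.length
    · by_cases h2 : i + 1 < cs.length
      · have hd1 : cs.drop i = cs[i] :: cs.drop (i + 1) := List.drop_eq_getElem_cons hi
        have hd2 : cs.drop (i + 1) = cs[i + 1] :: cs.drop (i + 2) := List.drop_eq_getElem_cons h2
        have hpair : (cs.drop i).take 2 = [cs[i], cs[i + 1]] := by rw [hd1, hd2]; rfl
        have hc : (cs.drop i).take 1 = [cs[i]] := by rw [hd1]; rfl
        have hbr := pair_bridge cs[i] cs[i + 1]
        rw [to_runes_loop, dif_pos hi, if_pos h2, hpair, hc]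
        rcases hdg : PySem.Dict.get? DIGRAPHS [cs[i], cs[i + 1]] with _ | d
        · rw [hdg] at hbr
          have hmem : [cs[i], cs[i + 1]] ∉ LATIN_TABLE := by
            by_cases hm : [cs[i], cs[i + 1]] ∈ LATIN_TABLE
            · rw [if_pos hm] at hbr; exact absurd hbr (by simp)
            · exact hm
          rw [if_neg hmem]
          have hsb := single_bridge cs[i]
          rcases hsg : PySem.Dict.get? SINGLES [cs[i]] with _ | s
          · rw [hsg] at hsb
            have hms : [cs[i]] ∉ LATIN_TABLE := by
              by_cases hm : [cs[i]] ∈ LATIN_TABLE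
              · rw [if_pos hm] at hsb; exact absurd hsb (by simp)
              · exact hm
            rw [if_neg hms, ih cs (i + 1) res (by omega), hd1, hd2]
            simp [tok, hdg, hsg]
          · rw [hsg] at hsb
            have hms : [cs[i]] ∈ LATIN_TABLE := by
              by_cases hm : [cs[i]] ∈ LATIN_TABLE
              · exact hm
              · rw [if_neg hm] at hsb; exact absurd hsb (by simp)
            have hval : (((PySem.List.index? LATIN_TABLE [cs[i]]).getD 0 : Nat) : Int) = s := by
              rw [if_pos hms] at hsb; exact Option.some.inj hsb
            rw [if_pos hms, hval, ih cs (i + 1) (res ++ [s]) (by omega), hd1, hd2]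
            simp [tok, hdg, hsg]
        · rw [hdg] at hbr
          have hmem : [cs[i], cs[i + 1]] ∈ LATIN_TABLE := by
            by_cases hm : [cs[i], cs[i + 1]] ∈ LATIN_TABLE
            · exact hm
            · rw [if_neg hm] at hbr; exact absurd hbr (by simp)
          have hval : (((PySem.List.index? LATIN_TABLE [cs[i], cs[i + 1]]).getD 0 : Nat) : Int) = d := by
            rw [if_pos hmem] at hbr; exact Option.some.inj hbr
          rw [if_pos hmem, hval, ih cs (i + 2) (res ++ [d]) (by omega), hd1, hd2]
          simp [tok, hdg]
      · have hd1 : cs.drop i = cs[i] :: cs.drop (i + 1) := List.drop_eq_getElem_cons hi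
        have hnil : cs.drop (i + 1) = [] := List.drop_eq_nil_of_le (by omega)
        have hc : (cs.drop i).take 1 = [cs[i]] := by rw [hd1]; rfl
        have hsb := single_bridge cs[i]
        rw [to_runes_loop, dif_pos hi, if_neg h2, hc]
        rcases hsg : PySem.Dict.get? SINGLES [cs[i]] with _ | s
        · rw [hsg] at hsb
          have hms : [cs[i]] ∉ LATIN_TABLE := by
            by_cases hm : [cs[i]] ∈ LATIN_TABLE
            · rw [if_pos hm] at hsb; exact absurd hsb (by simp)
            · exact hm
          rw [if_neg hms, ih cs (i + 1) res (by omega), hd1, hnil]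
          simp [tok, hsg]
        · rw [hsg] at hsb
          have hms : [cs[i]] ∈ LATIN_TABLE := by
            by_cases hm : [cs[i]] ∈ LATIN_TABLE
            · exact hm
            · rw [if_neg hm] at hsb; exact absurd hsb (by simp)
          have hval : (((PySem.List.index? LATIN_TABLE [cs[i]]).getD 0 : Nat) : Int) = s := by
            rw [if_pos hms] at hsb; exact Option.some.inj hsb
          rw [if_pos hms, hval, ih cs (i + 1) (res ++ [s]) (by omega), hd1, hnil]
          simp [tok, hsg]
    · rw [to_runes_loop, dif_neg hi, List.drop_eq_nil_of_le (by omega)]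
      simp [tok]

lemma foldB (l : List Char) :
    (∀ out, to_runes_flush (l.foldl to_runes_step (none, out)) = out ++ tok l) ∧
    (∀ p out, to_runes_flush (l.foldl to_runes_step (some p, out)) = out ++ tok (p :: l)) := by
  induction l with
  | nil =>
    constructor
    · intro out; simp [to_runes_flush, tok]
    · intro p out
      simp only [List.foldl_nil, to_runes_flush, tok]
      rcases PySem.Dict.get? SINGLES [p] with _ | s <;> simp
  | cons c l ih =>
    constructor
    · intro out
      rw [List.foldl_cons]
      show to_runes_flush (l.foldl to_runes_step (some c, out)) = out ++ tok (c :: l)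
      exact ih.2 c out
    · intro p out
      rw [List.foldl_cons]
      show to_runes_flush (l.foldl to_runes_step (to_runes_step (some p, out) c)) = out ++ tok (p :: c :: l)
      rcases hdg : PySem.Dict.get? DIGRAPHS [p, c] with _ | d
      · rcases hsg : PySem.Dict.get? SINGLES [p] with _ | s
        · rw [show to_runes_step (some p, out) c = (some c, out) by
            simp [to_runes_step, hdg, hsg], ih.2 c out]
          simp [tok, hdg, hsg]
        · rw [show to_runes_step (some p, out) c = (some c, out ++ [s]) by
            simp [to_runes_step, hdg, hsg], ih.2 c (out ++ [s])]
          simp [tok, hdg, hsg]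
      · rw [show to_runes_step (some p, out) c = (none, out ++ [d]) by
          simp [to_runes_step, hdg], ih.1 (out ++ [d])]
        simp [tok, hdg]

-- ===== VERDICT (by name: the statement is the Claim_ definition above) =====
theorem to_runes_spec : Claim_equal_to_runes := by
  intro text _
  unfold Spec_to_runes to_runes to_runes_alt
  rw [loopA_eq (PySem.Str.upper text).toList.length _ 0 [] (by omega), List.drop_zero,
    (foldB (PySem.Str.upper text).toList).1 []]
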